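-- pv_equiv track=rewrite | github.com/hayanLee/algorithm | 프로그래머스/1/155652. 둘만의 암호/둘만의 암호.py | solution
-- ===== SOURCE A (Python) =====
-- def solution(s, skip, index):
--     answer = []
--     all_alpha = 'abcdefghijklmnopqrstuvwxyz'
--     filtered_alpha = ''.join([ch for ch in all_alpha if ch not in skip])
--
--     alpha_dict = {}
--
--     for idx, value in enumerate(filtered_alpha):
--         alpha_dict[value]=idx
--
--     for ch in s:
--         new_idx = (alpha_dict[ch] + index) % len(alpha_dict)
--         answer.append(filtered_alpha[new_idx])
--
--     return ''.join(answer)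
-- ===== SOURCE B (Python) =====
-- def solution(s, skip, index):
--     alpha = 'abcdefghijklmnopqrstuvwxyz'
--     n = 26 - sum(ch in skip for ch in alpha)
--     out = []
--     for c in s:
--         rank = sum(ch not in skip for ch in alpha[:ord(c) - 97])
--         j = (rank + index) % n
--         for ch in alpha:
--             if ch not in skip:
--                 if j == 0:
--                     out.append(ch)
--                     break
--                 j -= 1
--     return ''.join(out)
-- ===== Notes on version B (the rewrite author's own statement) =====
-- stated objective: alternative
-- what changed: B never materializes the filtered alphabet or any dict: for each character it computes its rank arithmetically (count of non-skipped letters below it) and then unranks the shifted position by walking the fixed 26-letter alphabet to the j-th non-skipped letter (rank/select over the alphabet instead of A's precomputed list + char->index dict).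
import Mathlib
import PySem

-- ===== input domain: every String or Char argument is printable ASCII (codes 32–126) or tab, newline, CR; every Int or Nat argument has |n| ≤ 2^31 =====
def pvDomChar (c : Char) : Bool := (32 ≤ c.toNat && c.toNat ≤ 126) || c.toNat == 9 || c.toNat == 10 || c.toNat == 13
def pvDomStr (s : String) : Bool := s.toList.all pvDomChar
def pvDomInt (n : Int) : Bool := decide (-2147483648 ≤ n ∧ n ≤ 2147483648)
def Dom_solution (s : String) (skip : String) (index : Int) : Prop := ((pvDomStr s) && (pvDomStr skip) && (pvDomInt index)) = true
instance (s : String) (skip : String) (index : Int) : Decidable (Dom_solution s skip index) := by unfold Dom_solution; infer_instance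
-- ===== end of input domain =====

-- B drops A's filtered alphabet string and char->index dict entirely: each output character
-- is computed by rank (count of non-skipped letters below c) and select (walk the 26-letter
-- alphabet to the j-th non-skipped letter); objective: alternative (same result, no tables).

-- ===== PORT A =====
def solution (s : String) (skip : String) (index : Int) : String :=
  let allAlpha := "abcdefghijklmnopqrstuvwxyz".toList
  let filteredAlpha := allAlpha.filter (fun ch => !(PySem.Chars.isIn [ch] skip.toList))
  let alphaDict := (PySem.List.enumerate filteredAlpha 0).foldl
      (fun d p => d.insert p.2 p.1) (PySem.Dict.empty : PySem.Dict Char Int)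
  -- 'alpha_dict[ch]' raises KeyError for ch outside the filtered alphabet: Pre_ excludes that,
  -- so the total form getD is exact on Pre_
  let answer := s.toList.foldl (fun acc ch =>
      let newIdx := PySem.Int.mod (alphaDict.getD ch 0 + index) (alphaDict.size : Int)
      acc ++ [PySem.List.pyGetD filteredAlpha newIdx ' ']) []
  String.ofList answer

-- ===== PORT B =====
-- inner 'for ch in alpha: if ch not in skip: if j == 0: append+break else j -= 1'
def pvSelect (p : Char → Bool) : Int → List Char → Option Char
  | _, [] => none
  | j, ch :: rest =>
    if p ch then
      if j == 0 then some ch else pvSelect p (j - 1) rest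
    else pvSelect p j rest

def solution_alt (s : String) (skip : String) (index : Int) : String :=
  let alpha := "abcdefghijklmnopqrstuvwxyz".toList
  -- n = 26 - sum(ch in skip for ch in alpha)
  let n : Int := 26 - (alpha.map (fun ch => if PySem.Chars.isIn [ch] skip.toList then (1 : Int) else 0)).sum
  let out := s.toList.foldl (fun acc c =>
    -- rank = sum(ch not in skip for ch in alpha[:ord(c) - 97])
    let rank : Int := ((PySem.List.slice alpha none (some ((c.toNat : Int) - 97))).map
        (fun ch => if !(PySem.Chars.isIn [ch] skip.toList) then (1 : Int) else 0)).sum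
    -- j = (rank + index) % n ; n = 0 only when every letter is skipped, excluded by Pre_ for nonempty s
    let j := PySem.Int.mod (rank + index) n
    match pvSelect (fun ch => !(PySem.Chars.isIn [ch] skip.toList)) j alpha with
    | some ch => acc ++ [ch]
    | none => acc) []
  String.ofList out

-- ===== PRECONDITION & SPEC =====
-- Pre_ excludes exactly the inputs where A raises KeyError: some character of s is not a
-- lowercase letter or is one of the skipped letters.
def Pre_solution (s : String) (skip : String) (index : Int) : Prop :=
  (s.toList.all (fun c =>
    ("abcdefghijklmnopqrstuvwxyz".toList.contains c) && !(skip.toList.contains c))) = true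
instance (s : String) (skip : String) (index : Int) : Decidable (Pre_solution s skip index) := by
  unfold Pre_solution; infer_instance

def pvWitness_solution : String × String × Int := ("ab", "", 1)

def Spec_solution (s : String) (skip : String) (index : Int) (out : String) : Prop := out = solution_alt s skip index
instance (s : String) (skip : String) (index : Int) (out : String) : Decidable (Spec_solution s skip index out) := by unfold Spec_solution; infer_instance

-- ===== CLAIM (what is proved, stated in full; the proofs are below) =====
def Claim_equal_solution : Prop := ∀ (s : String) (skip : String) (index : Int), Dom_solution s skip index → Pre_solution s skip index → Spec_solution s skip index (solution s skip index)

-- ===== LEMMAS AND PROOFS =====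

theorem pv_isIn_singleton (c : Char) (l : List Char) :
    PySem.Chars.isIn [c] l = decide (c ∈ l) := by
  by_cases h : c ∈ l
  · simp only [h, decide_true]
    rw [PySem.Chars.isIn_iff_infix, List.singleton_infix_iff]
    exact h
  · simp only [h, decide_false]
    rw [PySem.Chars.isIn_eq_false_iff, List.singleton_infix_iff]
    exact h

-- a 0/1 indicator sum is countP
theorem pv_sum_indicator (p : Char → Bool) (l : List Char) :
    (l.map (fun ch => if p ch then (1 : Int) else 0)).sum = (l.countP p : Int) := by
  induction l with
  | nil => rfl
  | cons a t ih =>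
    simp only [List.map_cons, List.sum_cons, List.countP_cons, ih]
    by_cases h : p a <;> simp [h] <;> push_cast <;> ring

-- rank: for the i-th element of l satisfying p, countP p (take i) is its position in filter p
theorem pv_rank (p : Char → Bool) (l : List Char) (i : Nat) (hi : i < l.length)
    (hp : p l[i] = true) :
    (l.take i).countP p < (l.filter p).length ∧
    (l.filter p)[(l.take i).countP p]? = some l[i] := by
  induction l generalizing i with
  | nil => simp at hi
  | cons a t ih =>
    cases i with
    | zero =>
      simp only [List.getElem_cons_zero] at hp
      simp [List.filter_cons, hp]
    | succ i =>
      simp only [List.getElem_cons_succ] at hp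
      have hi' : i < t.length := by simpa using hi
      obtain ⟨h1, h2⟩ := ih i hi' hp
      simp only [List.take_succ_cons, List.countP_cons, List.filter_cons]
      by_cases ha : p a
      · simp only [ha, if_pos, List.length_cons, List.getElem?_cons]
        constructor
        · omega
        · simpa [Nat.add_comm] using h2
      · simp only [if_neg ha, Nat.add_zero]
        exact ⟨h1, h2⟩

-- select: pvSelect finds the j-th element of filter p
theorem pv_select (p : Char → Bool) (l : List Char) (j : Int) (hj : 0 ≤ j) :
    pvSelect p j l = (l.filter p)[j.toNat]? := by
  induction l generalizing j with
  | nil => simp [pvSelect]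
  | cons a t ih =>
    simp only [pvSelect, List.filter_cons]
    by_cases ha : p a
    · simp only [ha, if_pos]
      by_cases hj0 : j = 0
      · subst hj0; simp
      · have : (j == 0) = false := by simp [hj0]
        rw [this]
        simp only [Bool.false_eq_true, if_false]
        rw [ih (j - 1) (by omega)]
        have hjt : j.toNat = (j - 1).toNat + 1 := by omega
        rw [hjt, List.getElem?_cons_succ]
    · simp [ha, ih j hj]

-- letters of the alphabet literal
theorem pv_alpha_toNat : ∀ (i : Fin 26),
    ("abcdefghijklmnopqrstuvwxyz".toList.map Char.toNat)[(i : Nat)]? = some (97 + (i : Nat)) := by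
  decide

theorem pv_countP_not (q : Char → Bool) (l : List Char) :
    l.countP (fun x => !q x) + l.countP q = l.length := by
  induction l with
  | nil => rfl
  | cons a t ih =>
    simp only [List.countP_cons, List.length_cons]
    by_cases h : q a <;> simp [h] <;> omega

theorem solution_spec_aux : ∀ (s skip : String) (index : Int),
    Pre_solution s skip index → solution s skip index = solution_alt s skip index := by
  intro s skip index hpre
  have hpre' : ∀ c ∈ s.toList, c ∈ "abcdefghijklmnopqrstuvwxyz".toList ∧ c ∉ skip.toList := by
    intro c hc
    unfold Pre_solution at hpre
    have h := List.all_eq_true.mp hpre c hc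
    simp only [Bool.and_eq_true, Bool.not_eq_true'] at h
    exact ⟨by simpa using h.1, by simpa using h.2⟩
  clear hpre
  unfold solution solution_alt
  simp only []
  set A26 : List Char := "abcdefghijklmnopqrstuvwxyz".toList with hA26
  set p : Char → Bool := fun ch => !(PySem.Chars.isIn [ch] skip.toList) with hpdef
  set F : List Char := A26.filter p with hFdef
  have hF_nodup : F.Nodup := by
    apply List.Nodup.filter
    decide
  have hA26len : A26.length = 26 := by decide
  -- n = F.length
  have hn : (26 : Int) - (A26.map (fun ch => if PySem.Chars.isIn [ch] skip.toList then (1 : Int) else 0)).sum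
      = (F.length : Int) := by
    rw [pv_sum_indicator (fun ch => PySem.Chars.isIn [ch] skip.toList) A26, hFdef,
      ← List.countP_eq_length_filter]
    have h := pv_countP_not (fun ch => PySem.Chars.isIn [ch] skip.toList) A26
    rw [hA26len] at h
    rw [hpdef]
    omega
  rw [hn]
  -- membership in F
  have hmemF : ∀ c ∈ s.toList, c ∈ F := by
    intro c hc
    obtain ⟨h1, h2⟩ := hpre' c hc
    rw [hFdef, List.mem_filter, hpdef]
    refine ⟨h1, ?_⟩
    simp [pv_isIn_singleton, h2]
  -- A's dict: char -> index
  set dA := (PySem.List.enumerate F 0).foldl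
      (fun d q => d.insert q.2 q.1) (PySem.Dict.empty : PySem.Dict Char Int) with hdAdef
  have hsnd_nodup : (List.map (fun q => q.2) (PySem.List.enumerate F 0)).Nodup := by
    rw [PySem.List.map_snd_enumerate]; exact hF_nodup
  have hdA_items : dA.items = (PySem.List.enumerate F 0).map (fun q => (q.2, q.1)) := by
    rw [hdAdef, PySem.Dict.items_foldl_insert_fresh (PySem.List.enumerate F 0)
      (fun q => q.2) (fun q => q.1) PySem.Dict.empty (fun a _ => rfl) hsnd_nodup]
    rfl
  have hdA_size : dA.size = F.length := by
    rw [PySem.Dict.size, hdA_items, List.length_map, PySem.List.length_enumerate]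
  have hdA_keys : dA.keys = F := by
    rw [PySem.Dict.keys, hdA_items, List.map_map]
    exact PySem.List.map_snd_enumerate F 0
  have hdA_getD : ∀ (i : Nat) (hi : i < F.length), dA.getD F[i] 0 = (i : Int) := by
    intro i hi
    apply PySem.Dict.getD_of_mem_items dA _ (by rw [hdA_keys]; exact hF_nodup)
    rw [hdA_items, List.mem_map]
    exact ⟨((i : Int), F[i]), (PySem.List.mem_enumerate_iff F 0 _).mpr
      ⟨i, hi, by simp⟩, by simp⟩
  rw [hdA_size]
  -- per-character value: both steps append the same character
  have hchar : ∀ c ∈ s.toList,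
      pvSelect p (PySem.Int.mod
          (((PySem.List.slice A26 none (some ((c.toNat : Int) - 97))).map
            (fun ch => if !(PySem.Chars.isIn [ch] skip.toList) then (1 : Int) else 0)).sum
            + index) (F.length : Int)) A26
        = some (PySem.List.pyGetD F
          (PySem.Int.mod (dA.getD c 0 + index) (F.length : Int)) ' ') := by
    intro c hc
    show pvSelect p (PySem.Int.mod
          (((PySem.List.slice A26 none (some ((c.toNat : Int) - 97))).map
            (fun ch => if p ch then (1 : Int) else 0)).sum + index) (F.length : Int)) A26
        = some (PySem.List.pyGetD F
          (PySem.Int.mod (dA.getD c 0 + index) (F.length : Int)) ' ')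
    obtain ⟨i, hi26, hci⟩ := List.getElem_of_mem ((hpre' c hc).1)
    rw [hA26len] at hi26
    have htoNat : c.toNat = 97 + i := by
      have h := pv_alpha_toNat ⟨i, hi26⟩
      simp only [← hA26, List.getElem?_map, List.getElem?_eq_getElem (by omega : i < A26.length),
        Option.map_some] at h
      have h2 : A26[i]'(by omega) = c := hci
      rw [h2] at h
      exact Option.some.inj h
    -- the slice is take i
    have hslice : PySem.List.slice A26 none (some ((c.toNat : Int) - 97)) = A26.take i := by
      rw [htoNat]
      have h0 : ((97 + i : Nat) : Int) - 97 = ((i : Nat) : Int) := by push_cast; ring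
      rw [h0, PySem.List.slice_to A26 (by positivity)]
      simp
    -- rank = countP p (take i A26) = position of c in F
    have hpc : p c = true := by
      rw [hpdef]
      simp [pv_isIn_singleton, (hpre' c hc).2]
    obtain ⟨hrlt, hrget⟩ := pv_rank p A26 i (by omega) (by rw [hci]; exact hpc)
    set r : Nat := (A26.take i).countP p with hrdef
    have hFr : F[r]'(hrlt) = c := by
      have := hrget
      rw [List.getElem?_eq_getElem hrlt] at this
      rw [← hci]
      exact Option.some.inj this
    have hFlen : 0 < F.length := by rw [hFdef]; omega
    have hnI : (0 : Int) < (F.length : Int) := by exact_mod_cast hFlen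
    -- A's dict lookup equals r
    have hgetD : dA.getD c 0 = (r : Int) := by
      rw [← hFr]; exact hdA_getD r hrlt
    simp only [hslice, pv_sum_indicator p (A26.take i), ← hrdef, hgetD]
    set j : Int := PySem.Int.mod ((r : Int) + index) (F.length : Int) with hjdef
    have hj0 : 0 ≤ j := PySem.Int.mod_nonneg _ hnI
    have hj1 : j < F.length := PySem.Int.mod_lt _ hnI
    have hjN : j.toNat < F.length := by omega
    rw [pv_select p A26 j hj0, ← hFdef]
    have hA : PySem.List.pyGetD F j ' ' = F[j.toNat]'(hjN) := by
      have h1 := PySem.List.pyGetD_natCast (xs := F) (n := j.toNat) (d := ' ')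
      rw [show ((j.toNat : Nat) : Int) = j by omega] at h1
      rw [h1, List.getD_eq_getElem F ' ' hjN]
    rw [hA, List.getElem?_eq_getElem hjN]
  -- assemble the two folds
  refine congrArg String.ofList ?_
  refine PySem.List.foldl_congr_mem _ _ _ _ ?_
  intro acc c hc
  rw [hchar c hc]

theorem solution_spec : Claim_equal_solution := by
  intro s skip index _ hpre
  exact solution_spec_aux s skip index hpre
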